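-- pv_equiv track=rewrite | github.com/gbz3/try_pycobol | parse_binary.py | decode_zoned_decimal
-- ===== SOURCE A (Python) =====
-- def decode_zoned_decimal(zoned_bytes):
--     """
--     ゾーン10進数（Zoned Decimal）をデコード
--
--     ゾーン10進数形式:
--     - 各バイトの下位4ビット（ニブル）が数字（0-9）
--     - 最後のバイトの上位4ビット（ゾーン）が符号
--       - 0xC, 0xF: 正の数
--       - 0xD: 負の数
--
--     Args:
--         zoned_bytes: ゾーン10進数のバイト列
--
--     Returns:
--         int: デコードされた整数値
--
--     Raises:
--         ValueError: 不正なゾーン10進数フォーマット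
--     """
--     if not zoned_bytes:
--         raise ValueError("空のバイト列です")
--
--     digits = []
--     is_negative = False
--
--     for i, byte in enumerate(zoned_bytes):
--         # 上位4ビット（ゾーン）と下位4ビット（数字）を分離
--         zone = (byte >> 4) & 0x0F
--         digit = byte & 0x0F
--
--         # 数字部分の検証
--         if digit > 9:
--             raise ValueError(f"不正な数字: {digit} (バイト位置: {i})")
--
--         # 最後のバイト: 符号をチェック
--         if i == len(zoned_bytes) - 1:
--             if zone == 0xD:
--                 is_negative = True
--             elif zone not in (0xC, 0xF):
--                 # 警告として処理するが、データは読み取る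
--                 pass
--         else:
--             # 最後以外のバイト: 通常はゾーンが0xFであることを期待
--             if zone != 0xF:
--                 # 警告として処理するが、データは読み取る
--                 pass
--
--         digits.append(str(digit))
--
--     # 数字列を整数に変換
--     number_str = ''.join(digits)
--     try:
--         value = int(number_str)
--     except ValueError:
--         raise ValueError(f"数字列を整数に変換できません: {number_str}")
--
--     return -value if is_negative else value
-- ===== SOURCE B (Python) =====
-- def decode_zoned_decimal(zoned_bytes):
--     """Zoned-decimal decode: running integer accumulator instead of building a
--     digit-string list and re-parsing it with int(); sign read once from the last byte."""
--     if not zoned_bytes: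
--         raise ValueError("空のバイト列です")
--     value = 0
--     for i, byte in enumerate(zoned_bytes):
--         digit = byte & 0x0F
--         if digit > 9:
--             raise ValueError(f"不正な数字: {digit} (バイト位置: {i})")
--         value = value * 10 + digit
--     zone = (zoned_bytes[-1] >> 4) & 0x0F
--     return -value if zone == 0xD else value
-- ===== Notes on version B (the rewrite author's own statement) =====
-- stated objective: simpler
-- what changed: Replaces the digit-string list + ''.join + int() re-parse (with its dead try/except and per-byte zone bookkeeping) by a single running integer accumulator value = value*10 + digit, reading the sign once from the last byte after the loop.
import Mathlib
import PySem

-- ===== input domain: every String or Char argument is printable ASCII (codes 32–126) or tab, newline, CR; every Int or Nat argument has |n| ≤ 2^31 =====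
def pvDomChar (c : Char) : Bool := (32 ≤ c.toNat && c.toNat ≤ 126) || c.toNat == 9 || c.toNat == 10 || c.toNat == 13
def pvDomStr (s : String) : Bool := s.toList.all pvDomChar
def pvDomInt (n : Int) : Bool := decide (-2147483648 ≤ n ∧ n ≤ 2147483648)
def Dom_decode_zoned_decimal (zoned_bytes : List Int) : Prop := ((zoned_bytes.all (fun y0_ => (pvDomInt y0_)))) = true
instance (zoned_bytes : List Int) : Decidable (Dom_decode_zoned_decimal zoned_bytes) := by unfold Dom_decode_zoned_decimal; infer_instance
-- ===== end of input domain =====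

-- B drops A's digit-string list + join + int() re-parse for a running integer accumulator
-- (sign read once from the last byte); objective: simpler, same O(n) cost.

-- ===== PORT A =====
-- the for-loop over enumerate(zoned_bytes): state (digits, is_negative), none = ValueError raised
def decodeA_go (zb : List Int) (rest : List Int) (i : Int) (digits : List String)
    (is_negative : Bool) : Option (List String × Bool) :=
  match rest with
  | [] => some (digits, is_negative)
  | byte :: rest' =>
    let zone := PySem.Int.band (byte >>> (4:Nat)) 15
    let digit := PySem.Int.band byte 15
    if 9 < digit then none   -- raise ValueError
    else if i = PySem.List.len zb - 1 then
      if zone = 13 then decodeA_go zb rest' (i+1) (digits ++ [PySem.Int.toStr digit]) true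
      else decodeA_go zb rest' (i+1) (digits ++ [PySem.Int.toStr digit]) is_negative
    else decodeA_go zb rest' (i+1) (digits ++ [PySem.Int.toStr digit]) is_negative

def decode_zoned_decimal (zoned_bytes : List Int) : Int :=
  if zoned_bytes = [] then 0   -- raise ValueError (excluded by Pre_)
  else
    match decodeA_go zoned_bytes zoned_bytes 0 [] false with
    | none => 0                -- raise ValueError (excluded by Pre_)
    | some (digits, is_negative) =>
      let number_str := PySem.Str.join "" digits
      match PySem.Int.ofStr? number_str with
      | none => 0              -- re-raised ValueError (dead under Pre_)
      | some value => if is_negative then -value else value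

-- ===== PORT B =====
-- the accumulator loop: none = ValueError raised
def decodeB_go (rest : List Int) (value : Int) : Option Int :=
  match rest with
  | [] => some value
  | byte :: rest' =>
    let digit := PySem.Int.band byte 15
    if 9 < digit then none   -- raise ValueError
    else decodeB_go rest' (value * 10 + digit)

def decode_zoned_decimal_alt (zoned_bytes : List Int) : Int :=
  if zoned_bytes = [] then 0   -- raise ValueError (excluded by Pre_)
  else
    match decodeB_go zoned_bytes 0 with
    | none => 0                -- raise ValueError (excluded by Pre_)
    | some value =>
      let zone := PySem.Int.band (PySem.List.pyGetD zoned_bytes (-1) 0 >>> (4:Nat)) 15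
      if zone = 13 then -value else value

-- ===== PRECONDITION & SPEC =====
-- Pre_ excludes exactly the inputs on which A raises ValueError: the empty byte list
-- and any byte whose low nibble exceeds 9.
def Pre_decode_zoned_decimal (zoned_bytes : List Int) : Prop :=
  zoned_bytes ≠ [] ∧ ∀ b ∈ zoned_bytes, PySem.Int.band b 15 ≤ 9

instance (zoned_bytes : List Int) : Decidable (Pre_decode_zoned_decimal zoned_bytes) := by
  unfold Pre_decode_zoned_decimal; infer_instance

def pvWitness_decode_zoned_decimal : List Int := [241, 242, 211]

def Spec_decode_zoned_decimal (zoned_bytes : List Int) (out : Int) : Prop := out = decode_zoned_decimal_alt zoned_bytes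
instance (zoned_bytes : List Int) (out : Int) : Decidable (Spec_decode_zoned_decimal zoned_bytes out) := by unfold Spec_decode_zoned_decimal; infer_instance

-- ===== CLAIM (what is proved, stated in full; the proofs are below) =====
def Claim_equal_decode_zoned_decimal : Prop := ∀ (zoned_bytes : List Int), Dom_decode_zoned_decimal zoned_bytes → Pre_decode_zoned_decimal zoned_bytes → Spec_decode_zoned_decimal zoned_bytes (decode_zoned_decimal zoned_bytes)

-- ===== LEMMAS AND PROOFS =====

-- mirror of the (private) digit-run parser inside PySem.Int.ofChars?, parameterized by
-- the recursive call G; `pin` below identifies PySem.Int.ofChars? with it by rfl.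
def ofCharsG (G : List Char → Bool → Nat → Option Nat) (s : List Char) : Option Int :=
  have cs := (((s.dropWhile PySem.Int.isIntSpace).reverse.dropWhile PySem.Int.isIntSpace)).reverse
  match cs with
  | '-' :: ds => Option.map (fun n => -n) (do let a ← (match ds with | [] => none | cs => G cs false 0); pure (a : Int))
  | '+' :: ds => Option.map (fun n => n) (do let a ← (match ds with | [] => none | cs => G cs false 0); pure (a : Int))
  | ds => Option.map (fun n => n) (do let a ← (match ds with | [] => none | cs => G cs false 0); pure (a : Int))

theorem pin : ∃ G : List Char → Bool → Nat → Option Nat,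
    (∀ cs, PySem.Int.ofChars? cs = ofCharsG G cs)
  ∧ (∀ b n, G [] b n = if b then some n else none)
  ∧ (∀ c r b n, G (c :: r) b n =
      if c.isDigit then G r true (n * 10 + (c.toNat - '0'.toNat))
      else if c = '_' ∧ b = true then
        (match r with | d :: _ => if d.isDigit then G r false n else none | [] => none)
      else none) :=
  ⟨_, fun _ => rfl, fun _ _ => rfl, fun _ _ _ _ => rfl⟩

-- the character '0'+d for a digit value d
def digitChar (d : Int) : Char := Char.ofNat (48 + d.toNat)

theorem dig_facts (d : Int) (h0 : 0 ≤ d) (h9 : d ≤ 9) :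
    PySem.Int.toChars d = [digitChar d] ∧ (digitChar d).isDigit = true ∧
    ((digitChar d).toNat - '0'.toNat : Nat) = d.toNat ∧
    PySem.Int.isIntSpace (digitChar d) = false ∧
    digitChar d ≠ '-' ∧ digitChar d ≠ '+' := by
  interval_cases d <;> exact ⟨by decide, by decide, by decide, by decide, by decide, by decide⟩

theorem band15_nonneg (b : Int) : 0 ≤ PySem.Int.band b 15 := by
  rw [PySem.Int.band_comm]
  exact PySem.Int.band_nonneg_of_nonneg_left b (by norm_num)

theorem dropWhile_no (p : Char → Bool) (l : List Char) (h : ∀ c ∈ l, p c = false) :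
    l.dropWhile p = l := by
  cases l with
  | nil => rfl
  | cons c cs => simp [h c (List.mem_cons_self)]

-- A's loop: under in-range nibbles it appends str(digit) per byte and flips the sign
-- flag iff the last byte's zone nibble is 0xD.
theorem decodeA_go_eq (zb : List Int) :
    ∀ (rest : List Int) (i : Int) (digits : List String) (is_negative : Bool),
    (∀ b ∈ rest, PySem.Int.band b 15 ≤ 9) →
    i + rest.length = PySem.List.len zb →
    decodeA_go zb rest i digits is_negative =
      some (digits ++ rest.map (fun b => PySem.Int.toStr (PySem.Int.band b 15)),
        match rest.getLast? with
        | none => is_negative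
        | some b => if PySem.Int.band (b >>> (4:Nat)) 15 = 13 then true else is_negative) := by
  intro rest
  induction rest with
  | nil => intro i digits is_negative _ _; simp [decodeA_go]
  | cons byte rest ih =>
    intro i digits is_negative h hi
    have hb := h byte (List.mem_cons_self)
    have hrest : ∀ b ∈ rest, PySem.Int.band b 15 ≤ 9 :=
      fun x hx => h x (List.mem_cons_of_mem _ hx)
    have hi' : (i + 1) + rest.length = PySem.List.len zb := by
      simp only [List.length_cons] at hi; push_cast at hi ⊢; omega
    simp only [decodeA_go]
    rw [if_neg (by omega)]
    rcases List.eq_nil_or_concat rest with hre | ⟨ys, y, hys⟩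
    · subst hre
      have hlast : i = PySem.List.len zb - 1 := by
        simp only [List.length_cons, List.length_nil] at hi; omega
      rw [if_pos hlast]
      by_cases hz : PySem.Int.band (byte >>> (4:Nat)) 15 = 13
      · rw [if_pos hz]; simp [decodeA_go, hz]
      · rw [if_neg hz]; simp [decodeA_go, hz]
    · have hne : rest ≠ [] := by subst hys; simp
      have hilt : i ≠ PySem.List.len zb - 1 := by
        have : 1 ≤ rest.length := List.length_pos_iff.mpr hne
        simp only [List.length_cons] at hi; push_cast at hi; omega
      rw [if_neg hilt, ih (i+1) _ is_negative hrest hi']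
      have hgl : (byte :: rest).getLast? = rest.getLast? := by
        subst hys
        simp only [List.concat_eq_append]
        rw [← List.cons_append, List.getLast?_append_cons]
        simp
      simp [hgl]

-- B's loop: under in-range nibbles it is the base-10 fold of the nibbles.
theorem decodeB_go_eq :
    ∀ (rest : List Int) (v : Int), (∀ b ∈ rest, PySem.Int.band b 15 ≤ 9) →
    decodeB_go rest v =
      some ((rest.map (fun b => PySem.Int.band b 15)).foldl (fun a d => a * 10 + d) v) := by
  intro rest
  induction rest with
  | nil => intro v _; rfl
  | cons b rest ih =>
    intro v h
    have hb := h b (List.mem_cons_self)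
    simp only [decodeB_go, List.map_cons, List.foldl_cons]
    rw [if_neg (by omega)]
    exact ih _ (fun x hx => h x (List.mem_cons_of_mem _ hx))

-- parsing a non-empty all-digit character list is the base-10 fold of its digit values
theorem digit_not_space (c : Char) (h : c.isDigit = true) : PySem.Int.isIntSpace c = false := by
  simp only [PySem.Int.isIntSpace, Bool.or_eq_false_iff, decide_eq_false_iff_not]
  refine ⟨⟨⟨⟨⟨?_, ?_⟩, ?_⟩, ?_⟩, ?_⟩, ?_⟩ <;> rintro rfl <;> simp at h

theorem ofChars_digits (cs : List Char) (hne : cs ≠ []) (hd : ∀ c ∈ cs, c.isDigit = true) :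
    PySem.Int.ofChars? cs =
      some ((cs.foldl (fun a c => a * 10 + (c.toNat - '0'.toNat)) 0 : Nat) : Int) := by
  obtain ⟨G, hpin, h0, hstep⟩ := pin
  have grun : ∀ (l : List Char) (n : Nat), (∀ c ∈ l, c.isDigit = true) →
      G l true n = some (l.foldl (fun a c => a * 10 + (c.toNat - '0'.toNat)) n) := by
    intro l
    induction l with
    | nil => intro n _; rw [h0]; rfl
    | cons c l ih =>
      intro n hl
      rw [hstep, if_pos (hl c List.mem_cons_self), List.foldl_cons,
        ih _ (fun x hx => hl x (List.mem_cons_of_mem _ hx))]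
  match cs, hne with
  | c :: l, _ =>
    have hns : ∀ x ∈ c :: l, PySem.Int.isIntSpace x = false :=
      fun x hx => digit_not_space x (hd x hx)
    have e1 : (c :: l).dropWhile PySem.Int.isIntSpace = c :: l := dropWhile_no _ _ hns
    have e2 : (c :: l).reverse.dropWhile PySem.Int.isIntSpace = (c :: l).reverse :=
      dropWhile_no _ _ (fun x hx => hns x (List.mem_reverse.mp hx))
    rw [hpin]
    simp only [ofCharsG, e1, e2, List.reverse_reverse]
    split
    · next ds heq =>
      exfalso
      have : c = '-' := by injection heq
      have := hd c List.mem_cons_self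
      rw [this] at *; simp_all
    · next ds heq =>
      exfalso
      have : c = '+' := by injection heq
      have := hd c List.mem_cons_self
      rw [this] at *; simp_all
    · next heq1 heq2 =>
      rw [show (match c :: l with | [] => none | cs => G cs false 0) = G (c :: l) false 0 from rfl]
      rw [hstep, if_pos (hd c List.mem_cons_self), grun l _ (fun x hx => hd x (List.mem_cons_of_mem _ hx))]
      simp [List.foldl_cons]

-- the Int fold equals the Nat fold for nonnegative digits
theorem fold_cast (ds : List Int) (hd : ∀ d ∈ ds, 0 ≤ d) :
    ∀ (a : Nat), ds.foldl (fun a d => a * 10 + d) (a : Int) =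
      ((ds.foldl (fun a d => a * 10 + d.toNat) a : Nat) : Int) := by
  induction ds with
  | nil => intro a; rfl
  | cons d ds ih =>
    intro a
    have h0 := hd d (List.mem_cons_self)
    simp only [List.foldl_cons]
    have : ((a : Int)) * 10 + d = ((a * 10 + d.toNat : Nat) : Int) := by
      push_cast [Int.toNat_of_nonneg h0]; ring
    rw [this, ih (fun x hx => hd x (List.mem_cons_of_mem _ hx))]

-- the char-level fold equals the per-digit Nat fold
theorem foldl_digit (ds : List Int) (h : ∀ d ∈ ds, 0 ≤ d ∧ d ≤ 9) :
    ∀ (a : Nat), (ds.map digitChar).foldl (fun a c => a * 10 + (c.toNat - '0'.toNat)) a =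
      ds.foldl (fun a d => a * 10 + d.toNat) a := by
  induction ds with
  | nil => intro a; rfl
  | cons d ds ih =>
    intro a
    obtain ⟨h0, h9⟩ := h d List.mem_cons_self
    simp only [List.map_cons, List.foldl_cons, (dig_facts d h0 h9).2.2.1]
    exact ih (fun x hx => h x (List.mem_cons_of_mem _ hx)) _

-- ===== VERDICT (by name: the statement is the Claim_ definition above) =====
theorem decode_zoned_decimal_spec : Claim_equal_decode_zoned_decimal := by
  intro zb _ hpre
  obtain ⟨hne, hd⟩ := hpre
  unfold Spec_decode_zoned_decimal decode_zoned_decimal decode_zoned_decimal_alt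
  rw [if_neg hne, if_neg hne,
    decodeA_go_eq zb zb 0 [] false hd (by simp [PySem.List.len_eq]),
    decodeB_go_eq zb 0 hd]
  set ds := zb.map (fun b => PySem.Int.band b 15) with hds_def
  have hds : ∀ d ∈ ds, 0 ≤ d ∧ d ≤ 9 := by
    intro d hdm
    rw [hds_def] at hdm
    obtain ⟨b, hb, rfl⟩ := List.mem_map.mp hdm
    exact ⟨band15_nonneg b, hd b hb⟩
  have hdsne : ds ≠ [] := by
    rw [hds_def]; simpa using hne
  -- the joined digit string is the digit characters of ds
  have hchars : (PySem.Str.join "" (ds.map (fun d => PySem.Int.toStr d))).toList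
      = ds.map digitChar := by
    rw [PySem.Str.toList_join]
    have hmm : (ds.map (fun d => PySem.Int.toStr d)).map String.toList
        = (ds.map digitChar).map (fun c => [c]) := by
      simp only [List.map_map]
      refine List.map_congr_left (fun d hdm => ?_)
      obtain ⟨h0, h9⟩ := hds d hdm
      simp [PySem.Int.toList_toStr, (dig_facts d h0 h9).1]
    rw [hmm]
    simpa using PySem.Chars.join_nil_singletons (ds.map digitChar)
  have hparse : PySem.Int.ofStr? (PySem.Str.join "" (ds.map (fun d => PySem.Int.toStr d)))
      = some ((ds.foldl (fun a d => a * 10 + d.toNat) 0 : Nat) : Int) := by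
    have : PySem.Int.ofStr? (PySem.Str.join "" (ds.map (fun d => PySem.Int.toStr d)))
        = PySem.Int.ofChars? (PySem.Str.join "" (ds.map (fun d => PySem.Int.toStr d))).toList := rfl
    rw [this, hchars,
      ofChars_digits _ (by simpa using hdsne)
        (fun c hc => by
          obtain ⟨d, hdm, rfl⟩ := List.mem_map.mp hc
          obtain ⟨h0, h9⟩ := hds d hdm
          exact (dig_facts d h0 h9).2.1),
      foldl_digit ds hds 0]
  have hlast : zb.getLast? = some (zb.getLast hne) := List.getLast?_eq_some_getLast hne
  have hmap : List.map (fun b => PySem.Int.toStr (PySem.Int.band b 15)) zb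
      = ds.map (fun d => PySem.Int.toStr d) := by
    rw [hds_def]; simp [List.map_map]
  have hB : ds.foldl (fun a d => a * 10 + d) 0
      = ((ds.foldl (fun a d => a * 10 + d.toNat) 0 : Nat) : Int) := by
    have := fold_cast ds (fun d hdm => (hds d hdm).1) 0
    simpa using this
  rw [PySem.List.pyGetD_neg_one zb 0 hne]
  simp only [hlast, List.nil_append, hmap, hparse, hB]
  by_cases hz : PySem.Int.band (zb.getLast hne >>> (4:Nat)) 15 = 13 <;> simp [hz]
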